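-- pv_equiv track=rewrite | github.com/eric-houzelle/mini-gpt | train.py | get_current_block_size
-- ===== SOURCE A (Python) =====
-- def get_current_block_size(step, schedule, max_block_size):
--     """Return the block_size for a given optimizer step based on the progressive schedule."""
--     if not schedule:
--         return max_block_size
--     current = schedule[0][1]
--     for start_step, size in schedule:
--         if step >= start_step:
--             current = size
--     return min(current, max_block_size)
-- ===== SOURCE B (Python) =====
-- def get_current_block_size(step, schedule, max_block_size):
--     """Return the block_size for a given optimizer step based on the progressive schedule."""
--     if not schedule:
--         return max_block_size
--     for start_step, size in reversed(schedule):
--         if step >= start_step: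
--             return min(size, max_block_size)
--     return min(schedule[0][1], max_block_size)
-- ===== Notes on version B (the rewrite author's own statement) =====
-- stated objective: alternative
-- what changed: Replaces the accumulator that is overwritten by every matching entry during a full forward scan with a reverse scan that returns on the first matching entry (the last forward match), falling back to schedule[0][1] when no entry matches.
import Mathlib
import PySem

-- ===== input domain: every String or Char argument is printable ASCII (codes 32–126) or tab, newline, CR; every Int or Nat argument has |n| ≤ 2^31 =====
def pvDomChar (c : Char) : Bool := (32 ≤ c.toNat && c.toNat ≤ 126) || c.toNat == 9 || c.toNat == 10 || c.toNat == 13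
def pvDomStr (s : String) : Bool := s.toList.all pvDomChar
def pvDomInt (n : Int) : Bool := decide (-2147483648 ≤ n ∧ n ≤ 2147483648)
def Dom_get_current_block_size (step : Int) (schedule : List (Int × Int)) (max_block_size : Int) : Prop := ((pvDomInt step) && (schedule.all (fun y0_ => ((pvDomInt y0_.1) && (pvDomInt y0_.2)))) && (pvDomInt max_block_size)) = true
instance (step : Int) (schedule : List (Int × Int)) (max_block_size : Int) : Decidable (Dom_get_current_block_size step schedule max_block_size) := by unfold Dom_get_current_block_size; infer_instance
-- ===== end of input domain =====

-- ===== PORT A =====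
-- Port of A: full forward fold, accumulator overwritten by every matching entry.
def get_current_block_size (step : Int) (schedule : List (Int × Int)) (max_block_size : Int) : Int :=
  match schedule with
  | [] => max_block_size
  | p :: _ =>
    let current := schedule.foldl (fun cur (x : Int × Int) => if step ≥ x.1 then x.2 else cur) p.2
    min current max_block_size

-- ===== PORT B =====
-- B's loop over reversed(schedule): first matching entry wins.
def pvAltScan (step : Int) : List (Int × Int) → Option Int
  | [] => none
  | x :: rest => if step ≥ x.1 then some x.2 else pvAltScan step rest

-- Port of B: reverse scan, early return; fallback to schedule[0][1].
def get_current_block_size_alt (step : Int) (schedule : List (Int × Int)) (max_block_size : Int) : Int :=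
  match schedule with
  | [] => max_block_size
  | p :: _ =>
    match pvAltScan step schedule.reverse with
    | some sz => min sz max_block_size
    | none => min p.2 max_block_size

-- ===== PRECONDITION & SPEC =====
def Spec_get_current_block_size (step : Int) (schedule : List (Int × Int)) (max_block_size : Int) (out : Int) : Prop := out = get_current_block_size_alt step schedule max_block_size
instance (step : Int) (schedule : List (Int × Int)) (max_block_size : Int) (out : Int) : Decidable (Spec_get_current_block_size step schedule max_block_size out) := by unfold Spec_get_current_block_size; infer_instance

-- ===== CLAIM (what is proved, stated in full; the proofs are below) =====
def Claim_equal_get_current_block_size : Prop := ∀ (step : Int) (schedule : List (Int × Int)) (max_block_size : Int), Dom_get_current_block_size step schedule max_block_size → Spec_get_current_block_size step schedule max_block_size (get_current_block_size step schedule max_block_size)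

-- ===== LEMMAS AND PROOFS =====

-- ===== VERDICT (by name: the statement is the Claim_ definition above) =====
theorem pv_fold_eq_scan (step : Int) (l : List (Int × Int)) (cur : Int) :
    l.foldl (fun cur (x : Int × Int) => if step ≥ x.1 then x.2 else cur) cur
      = (match pvAltScan step l.reverse with
         | some sz => sz
         | none => cur) := by
  induction l using List.reverseRecOn generalizing cur with
  | nil => simp [pvAltScan]
  | append_singleton l' x ih =>
    simp only [List.foldl_append, List.foldl_cons, List.foldl_nil, List.reverse_append,
      List.reverse_singleton, List.singleton_append, pvAltScan]
    split
    · simp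
    · exact ih cur

theorem get_current_block_size_spec : Claim_equal_get_current_block_size := by
  intro step schedule max_block_size _
  unfold Spec_get_current_block_size get_current_block_size get_current_block_size_alt
  cases schedule with
  | nil => rfl
  | cons p rest =>
    simp only [pv_fold_eq_scan]
    split <;> rfl
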